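-- pv_equiv track=rewrite | github.com/BonbonKim/problem-solving | programmers/02_문자열 압축.py | solution
-- ===== SOURCE A (Python) =====
-- def solution(s):
--     patterns = list()
--
--     if len(s) == 1:
--         return 1
--
--     for n in range(1, int(len(s) / 2) + 1):
--         text = s
--         tmp_p = list()
--
--         pattern = ''
--         while text or tmp_p:
--             p, text = text[:n], text[n:]
--             len_p = str(len(tmp_p)) if len(tmp_p) > 1 else ""
--
--             if len(p) < n:
--                 pattern += len_p + tmp_p[0] + p
--                 break
--             if len(tmp_p) > 0 and p != tmp_p[0]:
--                 pattern += len_p + tmp_p[0]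
--                 tmp_p.clear()
--             tmp_p.append(p)
--         patterns.append(pattern)
--
--     patterns.sort(key=lambda x: len(x))
--     return len(patterns[0])
-- ===== SOURCE B (Python) =====
-- from itertools import groupby
--
--
-- def solution(s):
--     # Numeric compressed lengths via chunk-list + groupby; never builds the compressed strings.
--     if len(s) == 1:
--         return 1
--     lengths = []
--     for n in range(1, len(s) // 2 + 1):
--         chunks = [s[i:i + n] for i in range(0, len(s), n)]
--         total = 0
--         for v, grp in groupby(chunks):
--             c = len(list(grp))
--             total += (len(str(c)) if c > 1 else 0) + len(v)
--         lengths.append(total)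
--     return min(lengths)
-- ===== Notes on version B (the rewrite author's own statement) =====
-- stated objective: simpler
-- what changed: B never builds the compressed strings or A's interleaved chunk-buffer state machine: it chunks the string, groups consecutive equal chunks with itertools.groupby and sums digit-count+chunk lengths numerically, then takes min of the numeric lengths instead of sorting strings by length and measuring the first.
import Mathlib
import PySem

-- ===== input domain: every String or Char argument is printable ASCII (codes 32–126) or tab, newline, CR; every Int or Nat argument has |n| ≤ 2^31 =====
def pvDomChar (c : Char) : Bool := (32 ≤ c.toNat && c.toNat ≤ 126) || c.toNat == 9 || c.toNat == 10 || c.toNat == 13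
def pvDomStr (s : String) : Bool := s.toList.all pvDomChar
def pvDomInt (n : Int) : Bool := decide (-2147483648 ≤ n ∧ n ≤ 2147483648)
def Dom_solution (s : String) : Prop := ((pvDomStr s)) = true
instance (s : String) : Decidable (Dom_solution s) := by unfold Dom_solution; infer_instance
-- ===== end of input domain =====

-- B replaces A's interleaved string-building state machine by chunk + groupby + numeric sum with min()
-- (objective: simpler). Pre_ excludes only s = "", where both Pythons raise (IndexError / ValueError).


-- ===== PORT A =====
-- str(len(tmp_p)) if len(tmp_p) > 1 else ""
def aNumStr (c : Nat) : List Char := if c > 1 then PySem.Int.toChars (c : Int) else []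

-- A's while loop; text[:n]/text[n:] are take/drop (exact for n ≥ 0); tmp_p[0] is headD (tmp_p is
-- never empty when it is read, for the calls A makes); fuel = text.length + 1 only guards totality.
def aLoop (fuel n : Nat) (text : List Char) (tmp : List (List Char)) (pat : List Char) : List Char :=
  match fuel with
  | 0 => pat
  | fuel + 1 =>
    if text = [] ∧ tmp = [] then pat
    else
      let p := text.take n
      let rest := text.drop n
      let lenp := aNumStr tmp.length
      if p.length < n then pat ++ lenp ++ tmp.headD [] ++ p
      else if tmp.length > 0 ∧ p ≠ tmp.headD [] then
        aLoop fuel n rest [p] (pat ++ lenp ++ tmp.headD [])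
      else aLoop fuel n rest (tmp ++ [p]) pat

def solution (s : String) : Int :=
  let cs := s.toList
  if cs.length = 1 then 1
  else
    -- int(len(s) / 2) = len(s) / 2 (exact: float halves are exact below 2^52)
    let patterns := (PySem.List.pyRange 1 (((cs.length / 2 : Nat) : Int) + 1) 1).foldl
      (fun acc n => acc ++ [aLoop (cs.length + 1) n.toNat cs [] []]) []
    let sortedPs := PySem.List.sorted patterns (fun p => p.length) false
    ((PySem.List.pyGetD sortedPs 0 []).length : Int)  -- patterns[0]: IndexError (s = "") excluded by Pre_

-- ===== PORT B =====
-- chunks = [s[i:i+n] for i in range(0, len(s), n)], written as the take/drop unfolding of that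
-- comprehension; fuel = cs.length only guards totality (each step drops n ≥ 1 chars).
def bChunks (fuel n : Nat) (cs : List Char) : List (List Char) :=
  match fuel, cs with
  | _, [] => []
  | 0, _ => []
  | f + 1, cs => cs.take n :: bChunks f n (cs.drop n)

-- itertools.groupby: consecutive runs with their lengths
def bGroups (l : List (List Char)) : List (List Char × Nat) :=
  match l with
  | [] => []
  | v :: rest =>
    (v, (rest.takeWhile (· == v)).length + 1) :: bGroups (rest.dropWhile (· == v))
termination_by l.length
decreasing_by simpa using Nat.lt_succ_of_le (List.length_dropWhile_le (· == v) rest)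

-- (len(str(c)) if c > 1 else 0) + len(v)
def bCost (v : List Char) (c : Nat) : Int :=
  (if c > 1 then ((PySem.Int.toChars (c : Int)).length : Int) else 0) + v.length

def solution_alt (s : String) : Int :=
  let cs := s.toList
  if cs.length = 1 then 1
  else
    let lengths := (PySem.List.pyRange 1 (((cs.length / 2 : Nat) : Int) + 1) 1).foldl
      (fun acc n =>
        acc ++ [((bGroups (bChunks cs.length n.toNat cs)).map (fun g => bCost g.1 g.2)).foldl (· + ·) 0]) []
    (PySem.List.min? lengths (fun x => x)).getD 0  -- min(lengths): ValueError (s = "") excluded by Pre_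

-- ===== PRECONDITION & SPEC =====
-- Pre_ excludes only the empty string, on which A raises IndexError (patterns[0]) and B raises ValueError (min([])).
def Pre_solution (s : String) : Prop := s ≠ ""
instance (s : String) : Decidable (Pre_solution s) := by unfold Pre_solution; infer_instance
def pvWitness_solution : String := "aabbaccc"

def Spec_solution (s : String) (out : Int) : Prop := out = solution_alt s
instance (s : String) (out : Int) : Decidable (Spec_solution s out) := by unfold Spec_solution; infer_instance

-- ===== CLAIM (what is proved, stated in full; the proofs are below) =====
def Claim_equal_solution : Prop := ∀ (s : String), Dom_solution s → Pre_solution s → Spec_solution s (solution s)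

-- ===== LEMMAS AND PROOFS =====

-- cost of the rest of the compression, continuing a current run of c copies of v, over a chunk list
def costA (n : Nat) (v : List Char) (c : Nat) : List (List Char) → Int
  | [] => bCost v c
  | p :: rest =>
    if p.length < n then bCost v c + p.length
    else if p ≠ v then bCost v c + costA n p 1 rest
    else costA n v (c + 1) rest

-- groupby continuing an open run of c copies of v
def bGroupsCont (v : List Char) (c : Nat) : List (List Char) → List (List Char × Nat)
  | [] => [(v, c)]
  | p :: rest => if p == v then bGroupsCont v (c + 1) rest else (v, c) :: bGroupsCont p 1 rest

theorem bChunks_fuel (n : Nat) (hn : 1 ≤ n) :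
    ∀ fuel fuel' (cs : List Char), cs.length ≤ fuel → cs.length ≤ fuel' →
      bChunks fuel n cs = bChunks fuel' n cs := by
  intro fuel
  induction fuel with
  | zero =>
    intro fuel' cs h _
    have hcs : cs = [] := List.eq_nil_of_length_eq_zero (Nat.le_zero.mp h)
    subst hcs
    cases fuel' <;> simp [bChunks]
  | succ f ih =>
    intro fuel' cs h h'
    cases cs with
    | nil => cases fuel' <;> simp [bChunks]
    | cons a t =>
      cases fuel' with
      | zero => simp at h'
      | succ f' =>
        simp only [bChunks]
        have hd : ((a :: t).drop n).length ≤ f := by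
          simp [List.length_drop]; simp at h; omega
        have hd' : ((a :: t).drop n).length ≤ f' := by
          simp [List.length_drop]; simp at h'; omega
        rw [ih f' _ hd hd']

theorem bGroupsCont_eq :
    ∀ (l : List (List Char)) (v : List Char) (c : Nat),
      bGroupsCont v c l =
        (v, c + (l.takeWhile (· == v)).length) :: bGroups (l.dropWhile (· == v)) := by
  intro l
  induction l with
  | nil => intro v c; simp [bGroupsCont, bGroups]
  | cons p rest ih =>
    intro v c
    by_cases hp : p = v
    · subst hp
      rw [show bGroupsCont p c (p :: rest) = bGroupsCont p (c + 1) rest by simp [bGroupsCont]]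
      rw [ih]
      simp only [List.takeWhile_cons, List.dropWhile_cons, BEq.rfl, if_true, List.length_cons]
      have : c + 1 + (rest.takeWhile (· == p)).length = c + ((rest.takeWhile (· == p)).length + 1) := by omega
      rw [this]
    · have hbeq : (p == v) = false := by simp [hp]
      rw [show bGroupsCont v c (p :: rest) = (v, c) :: bGroupsCont p 1 rest by simp [bGroupsCont, hbeq]]
      rw [ih]
      have h1 : 1 + (rest.takeWhile (· == p)).length = (rest.takeWhile (· == p)).length + 1 := by omega
      rw [h1]
      simp only [List.takeWhile_cons, List.dropWhile_cons, hbeq, Bool.false_eq_true, if_false,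
        List.length_nil, Nat.add_zero]
      conv_rhs => rw [bGroups]

theorem sum_bGroupsCont (n : Nat) (hn : 1 ≤ n) :
    ∀ k (cs : List Char) (v : List Char) (c : Nat), cs.length ≤ k → v.length = n →
      ((bGroupsCont v c (bChunks cs.length n cs)).map (fun g => bCost g.1 g.2)).sum =
        costA n v c (bChunks cs.length n cs) := by
  intro k
  induction k with
  | zero =>
    intro cs v c h _
    have hcs : cs = [] := List.eq_nil_of_length_eq_zero (Nat.le_zero.mp h)
    subst hcs
    simp [bChunks, bGroupsCont, costA]
  | succ k ih =>
    intro cs v c h hv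
    cases cs with
    | nil => simp [bChunks, bGroupsCont, costA]
    | cons a t =>
      have hrest : ((a :: t).drop n).length ≤ t.length := by
        simp [List.length_drop]; omega
      have hchunk : bChunks (a :: t).length n (a :: t)
          = (a :: t).take n :: bChunks ((a :: t).drop n).length n ((a :: t).drop n) := by
        simp only [List.length_cons, bChunks]
        rw [bChunks_fuel n hn t.length ((a :: t).drop n).length _ hrest (Nat.le_refl _)]
      rw [hchunk]
      by_cases hlt : t.length + 1 < n
      · have htake : (a :: t).take n = a :: t := List.take_of_length_le (by simp; omega)
        have hdrop : (a :: t).drop n = [] := List.drop_eq_nil_of_le (by simp; omega)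
        have hne : ((a :: t) == v) = false := by
          simp only [beq_eq_false_iff_ne, ne_eq]
          intro he
          have := congrArg List.length he
          simp [hv] at this
          omega
        rw [htake, hdrop]
        simp only [bChunks, bGroupsCont, hne, Bool.false_eq_true, if_false, costA]
        have hlen : (a :: t).length < n := by simp; omega
        rw [if_pos hlen]
        simp [bCost]
      · have hplen : ((a :: t).take n).length = n := by
          simp [List.length_take]; omega
        have hnlt : ¬ ((a :: t).take n).length < n := by omega
        have hrk : ((a :: t).drop n).length ≤ k := by
          simp at h; omega
        by_cases hpv : (a :: t).take n = v
        · simp only [hpv, bGroupsCont, beq_self_eq_true, if_true, costA]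
          have hvn : ¬ v.length < n := by omega
          rw [if_neg hvn, if_neg (show ¬ v ≠ v from fun h => h rfl)]
          exact ih _ v (c + 1) hrk hv
        · have hbeq : ((a :: t).take n == v) = false := by simp [hpv]
          simp only [bGroupsCont, hbeq, Bool.false_eq_true, if_false, costA, hnlt, ne_eq, hpv,
            not_false_eq_true, if_true, List.map_cons, List.sum_cons]
          rw [ih _ ((a :: t).take n) 1 hrk hplen]

theorem aLoop_costA (n : Nat) (hn : 1 ≤ n) :
    ∀ fuel (text : List Char) (tmp : List (List Char)) (pat : List Char),
      tmp ≠ [] → text.length < fuel →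
      ((aLoop fuel n text tmp pat).length : Int) =
        pat.length + costA n (tmp.headD []) tmp.length (bChunks text.length n text) := by
  intro fuel
  induction fuel with
  | zero => intro text tmp pat _ hf; omega
  | succ fuel ih =>
    intro text tmp pat htmp hf
    have hcond : ¬ (text = [] ∧ tmp = []) := by intro hc; exact htmp hc.2
    cases text with
    | nil =>
      simp only [aLoop]
      rw [if_neg (by simpa using htmp)]
      have h0 : 0 < n := hn
      simp only [List.take_nil, List.length_nil, if_pos h0]
      simp [bChunks, costA, bCost, aNumStr]
      split_ifs <;> simp_all
    | cons a t =>
      have hchunk : bChunks (a :: t).length n (a :: t)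
          = (a :: t).take n :: bChunks ((a :: t).drop n).length n ((a :: t).drop n) := by
        simp only [List.length_cons, bChunks]
        rw [bChunks_fuel n hn t.length ((a :: t).drop n).length _ (by simp [List.length_drop]; omega) (Nat.le_refl _)]
      rw [hchunk]
      by_cases hlt : t.length + 1 < n
      · have htake : (a :: t).take n = a :: t := List.take_of_length_le (by simp; omega)
        have hplen : ((a :: t).take n).length < n := by rw [htake]; simp; omega
        have hdrop : (a :: t).drop n = [] := List.drop_eq_nil_of_le (by simp; omega)
        simp only [aLoop]
        rw [if_neg hcond, if_pos hplen, htake, hdrop]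
        simp [bChunks, costA, bCost, aNumStr]
        split_ifs
        all_goals simp_all
        all_goals omega
      · have hplen : ((a :: t).take n).length = n := by simp [List.length_take]; omega
        have hnlt : ¬ ((a :: t).take n).length < n := by omega
        have hfr : ((a :: t).drop n).length < fuel := by simp [List.length_drop] at *; omega
        by_cases hpv : (a :: t).take n = tmp.headD []
        · have hbr : ¬ (tmp.length > 0 ∧ (a :: t).take n ≠ tmp.headD []) := by
            intro hc; exact hc.2 hpv
          simp only [aLoop, hcond, if_false, hnlt]
          rw [if_neg hbr]
          rw [ih _ (tmp ++ [(a :: t).take n]) pat (by simp) hfr]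
          have hhead : (tmp ++ [(a :: t).take n]).headD [] = tmp.headD [] := by
            cases tmp with
            | nil => exact absurd rfl htmp
            | cons x xs => simp
          rw [hhead]
          have hlen1 : (tmp ++ [(a :: t).take n]).length = tmp.length + 1 := by simp
          rw [hlen1]
          have hcA : costA n (tmp.headD []) tmp.length
              ((a :: t).take n :: bChunks ((a :: t).drop n).length n ((a :: t).drop n))
              = costA n (tmp.headD []) (tmp.length + 1)
                  (bChunks ((a :: t).drop n).length n ((a :: t).drop n)) := by
            simp only [costA, hnlt, if_false]
            rw [if_neg (show ¬ (a :: t).take n ≠ tmp.headD [] from fun h => h hpv)]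
          rw [hcA]
        · have hbr : tmp.length > 0 ∧ (a :: t).take n ≠ tmp.headD [] := by
            exact ⟨List.length_pos_iff.mpr htmp, hpv⟩
          simp only [aLoop, hcond, if_false, hnlt]
          rw [if_pos hbr]
          rw [ih _ [(a :: t).take n] (pat ++ aNumStr tmp.length ++ tmp.headD []) (by simp) hfr]
          have hcA : costA n (tmp.headD []) tmp.length
              ((a :: t).take n :: bChunks ((a :: t).drop n).length n ((a :: t).drop n))
              = bCost (tmp.headD []) tmp.length
                + costA n ((a :: t).take n) 1 (bChunks ((a :: t).drop n).length n ((a :: t).drop n)) := by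
            simp only [costA, hnlt, if_false]
            rw [if_pos hpv]
          rw [hcA]
          simp only [List.headD_cons, List.length_cons, List.length_nil, Nat.zero_add,
            List.length_append, bCost, aNumStr]
          split_ifs <;> simp_all <;> omega

theorem perN (n : Nat) (cs : List Char) (hn : 1 ≤ n) (hle : n ≤ cs.length) (hne : cs ≠ []) :
    ((aLoop (cs.length + 1) n cs [] []).length : Int) =
      ((bGroups (bChunks cs.length n cs)).map (fun g => bCost g.1 g.2)).foldl (· + ·) 0 := by
  obtain ⟨a, t, rfl⟩ := List.exists_cons_of_ne_nil hne
  have hplen : ((a :: t).take n).length = n := by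
    simp only [List.length_take]; simp at hle ⊢; omega
  have hnlt : ¬ ((a :: t).take n).length < n := by omega
  have hA1 : aLoop ((a :: t).length + 1) n (a :: t) [] []
      = aLoop (a :: t).length n ((a :: t).drop n) [(a :: t).take n] [] := by
    simp only [aLoop]
    rw [if_neg (by simp), if_neg hnlt, if_neg (by simp)]
    simp
  rw [hA1]
  have hfr : ((a :: t).drop n).length < (a :: t).length := by
    simp [List.length_drop]; omega
  rw [aLoop_costA n hn _ _ _ _ (by simp) hfr]
  rw [← List.sum_eq_foldl]
  have hchunk : bChunks (a :: t).length n (a :: t)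
      = (a :: t).take n :: bChunks ((a :: t).drop n).length n ((a :: t).drop n) := by
    simp only [List.length_cons, bChunks]
    rw [bChunks_fuel n hn t.length ((a :: t).drop n).length _
      (by simp [List.length_drop]; omega) (Nat.le_refl _)]
  rw [hchunk]
  have hgr : bGroups ((a :: t).take n :: bChunks ((a :: t).drop n).length n ((a :: t).drop n))
      = bGroupsCont ((a :: t).take n) 1 (bChunks ((a :: t).drop n).length n ((a :: t).drop n)) := by
    rw [bGroupsCont_eq]
    conv_lhs => rw [bGroups]
    rw [Nat.add_comm 1 _]
  rw [hgr, sum_bGroupsCont n hn ((a :: t).drop n).length _ _ 1 (Nat.le_refl _) hplen]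
  simp

theorem head_sorted_len_eq_min (pats : List (List Char)) (hne : pats ≠ []) :
    ((PySem.List.pyGetD (PySem.List.sorted pats (fun p => p.length) false) 0 []).length : Int)
      = (PySem.List.min? (pats.map (fun p => (p.length : Int))) (fun x => x)).getD 0 := by
  cases hS : PySem.List.sorted pats (fun p => p.length) false with
  | nil => exact absurd ((PySem.List.sorted_eq_nil_iff _ _ _).mp hS) hne
  | cons m t =>
    rw [PySem.List.pyGetD_zero_cons]
    have hmle : ∀ y ∈ pats, m.length ≤ y.length := PySem.List.key_head_sorted_le pats _ hS
    have hm_mem : m ∈ pats := by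
      have hmem : m ∈ PySem.List.sorted pats (fun p => p.length) false := by
        rw [hS]; exact List.mem_cons_self
      exact (PySem.List.mem_sorted _ _ _ _).mp hmem
    cases hmin : PySem.List.min? (pats.map (fun p => (p.length : Int))) (fun x => x) with
    | none =>
      have h0 := (PySem.List.min?_eq_none_iff _ _).mp hmin
      simp [hne] at h0
    | some u =>
      obtain ⟨q, hq, rfl⟩ := List.mem_map.mp (PySem.List.min?_mem hmin)
      have h1 : m.length ≤ q.length := hmle q hq
      have h3 : (q.length : Int) ≤ (m.length : Int) :=
        PySem.List.min?_isMin hmin _ (List.mem_map_of_mem hm_mem)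
      simp only [Option.getD_some]
      omega

-- ===== VERDICT (by name: the statement is the Claim_ definition above) =====
theorem solution_spec : Claim_equal_solution := by
  intro s _ hpre
  unfold Spec_solution
  simp only [solution, solution_alt]
  have hne : s.toList ≠ [] := by
    intro h
    exact hpre (by cases s with | _ d => simp_all)
  by_cases h1 : s.toList.length = 1
  · simp [h1]
  · simp only [h1, if_false]
    have hlen2 : 2 ≤ s.toList.length := by
      have h0 : s.toList.length ≠ 0 := by simpa using hne
      omega
    rw [PySem.List.foldl_append_singleton_eq_map, PySem.List.foldl_append_singleton_eq_map,
      List.nil_append, List.nil_append]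
    have hmap : (PySem.List.pyRange 1 (((s.toList.length / 2 : Nat) : Int) + 1) 1).map
        (fun n => ((bGroups (bChunks s.toList.length n.toNat s.toList)).map
          (fun g => bCost g.1 g.2)).foldl (· + ·) 0)
        = ((PySem.List.pyRange 1 (((s.toList.length / 2 : Nat) : Int) + 1) 1).map
            (fun n => aLoop (s.toList.length + 1) n.toNat s.toList [] [])).map
            (fun p => (p.length : Int)) := by
      rw [List.map_map]
      apply List.map_congr_left
      intro x hx
      have hx' := (PySem.List.mem_pyRange_one).mp hx
      have hn1 : 1 ≤ x.toNat := by omega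
      have hnle : x.toNat ≤ s.toList.length := by omega
      exact (perN x.toNat s.toList hn1 hnle hne).symm
    rw [hmap]
    rw [head_sorted_len_eq_min]
    intro hmapnil
    rw [List.map_eq_nil_iff] at hmapnil
    have h1mem : (1 : Int) ∈ PySem.List.pyRange 1 (((s.toList.length / 2 : Nat) : Int) + 1) 1 := by
      rw [PySem.List.mem_pyRange_one]
      constructor
      · omega
      · have : 1 ≤ s.toList.length / 2 := by omega
        omega
    rw [hmapnil] at h1mem
    simp at h1mem
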